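-- pv_equiv track=rewrite | github.com/urbandecay/rCAD_utils | rCAD_utils/extrude_along_path/helper_functions.py | trace_path_to_end
-- ===== SOURCE A (Python) =====
-- def get_adjacent_vertices(edge_list):
--     adj = {}
--     for edge in edge_list:
--         a, b = edge
--         if a in adj:
--             adj[a].append(b)
--         else:
--             adj[a] = [b]
--         if b in adj:
--             adj[b].append(a)
--         else:
--             adj[b] = [a]
--     return adj
--
-- def trace_path_to_end(start_vertex, first_neighbor, edge_list):
--     adjacent_for_trace = get_adjacent_vertices(edge_list)
--
--     current = first_neighbor
--     previous = start_vertex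
--     actual_path_traced = [start_vertex, current]
--
--     max_iterations = len(edge_list) + 5
--     iterations = 0
--
--     while iterations < max_iterations:
--         iterations += 1
--         neighbors_of_current = adjacent_for_trace.get(current, [])
--         next_candidates = [n for n in neighbors_of_current if n != previous]
--
--         if not next_candidates:
--             return current, actual_path_traced
--         elif len(next_candidates) == 1:
--             previous = current
--             current = next_candidates[0]
--             actual_path_traced.append(current)
--         else:
--             return current, actual_path_traced
--
--     return current, actual_path_traced
-- ===== SOURCE B (Python) =====
-- def trace_path_to_end(start_vertex, first_neighbor, edge_list):
--     current = first_neighbor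
--     previous = start_vertex
--     actual_path_traced = [start_vertex, current]
--     for _ in range(len(edge_list) + 5):
--         next_candidates = []
--         for a, b in edge_list:
--             if a == current and b != previous:
--                 next_candidates.append(b)
--             if b == current and a != previous:
--                 next_candidates.append(a)
--         if len(next_candidates) != 1:
--             return current, actual_path_traced
--         previous, current = current, next_candidates[0]
--         actual_path_traced.append(current)
--     return current, actual_path_traced
-- ===== Notes on version B (the rewrite author's own statement) =====
-- stated objective: simpler
-- what changed: B drops the get_adjacent_vertices dictionary entirely and computes the non-previous neighbor candidates of the current vertex by a single scan of edge_list at each step, collapsing the 0/>=2 branches into one 'len != 1' return.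
import Mathlib
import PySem

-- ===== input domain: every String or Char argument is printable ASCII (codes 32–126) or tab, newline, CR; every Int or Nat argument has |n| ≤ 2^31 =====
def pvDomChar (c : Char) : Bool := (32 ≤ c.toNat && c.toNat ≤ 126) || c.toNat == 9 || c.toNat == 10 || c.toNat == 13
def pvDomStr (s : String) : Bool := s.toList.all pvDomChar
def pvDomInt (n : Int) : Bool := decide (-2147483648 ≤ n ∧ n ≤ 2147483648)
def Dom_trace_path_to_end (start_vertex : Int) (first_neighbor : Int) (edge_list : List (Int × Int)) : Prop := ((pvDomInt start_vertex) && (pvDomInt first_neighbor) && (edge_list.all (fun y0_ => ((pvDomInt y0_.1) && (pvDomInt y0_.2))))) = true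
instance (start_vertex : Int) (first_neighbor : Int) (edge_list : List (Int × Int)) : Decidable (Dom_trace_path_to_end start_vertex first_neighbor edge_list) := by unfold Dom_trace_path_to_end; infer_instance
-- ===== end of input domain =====

-- B replaces A's adjacency dictionary with a per-step scan of the edge list: simpler, no faster.

-- ===== PORT A =====
-- loop body of get_adjacent_vertices: record b as a neighbor of a and a as a neighbor of b
def adjStep (adj : PySem.Dict Int (List Int)) (e : Int × Int) : PySem.Dict Int (List Int) :=
  let a := e.1
  let b := e.2
  let adj := if adj.contains a then adj.modify a [] (fun l => l ++ [b]) else adj.insert a [b]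
  if adj.contains b then adj.modify b [] (fun l => l ++ [a]) else adj.insert b [a]

def get_adjacent_vertices (edge_list : List (Int × Int)) : PySem.Dict Int (List Int) :=
  edge_list.foldl adjStep PySem.Dict.empty

-- the while loop, fuel = max_iterations - iterations
def walkA (adj : PySem.Dict Int (List Int)) : Nat → Int → Int → List Int → Int × List Int
  | 0, current, _, path => (current, path)
  | fuel+1, current, previous, path =>
    let next_candidates := (adj.getD current []).filter (fun n => n != previous)
    match next_candidates with
    | [] => (current, path)
    | [c] => walkA adj fuel c current (path ++ [c])
    | _ => (current, path)

def trace_path_to_end (start_vertex : Int) (first_neighbor : Int) (edge_list : List (Int × Int)) : Int × List Int :=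
  let adj := get_adjacent_vertices edge_list
  walkA adj (edge_list.length + 5) first_neighbor start_vertex [start_vertex, first_neighbor]

-- ===== PORT B =====
-- inner for-loop of B: collect per edge the endpoints adjacent to current other than previous
def candsB (edge_list : List (Int × Int)) (current previous : Int) : List Int :=
  edge_list.flatMap (fun e =>
    (if e.1 == current && e.2 != previous then [e.2] else []) ++
    (if e.2 == current && e.1 != previous then [e.1] else []))

def walkB (edge_list : List (Int × Int)) : Nat → Int → Int → List Int → Int × List Int
  | 0, current, _, path => (current, path)
  | fuel+1, current, previous, path =>
    let next_candidates := candsB edge_list current previous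
    if next_candidates.length == 1 then
      walkB edge_list fuel (next_candidates.headD 0) current (path ++ [next_candidates.headD 0])
    else
      (current, path)

def trace_path_to_end_alt (start_vertex : Int) (first_neighbor : Int) (edge_list : List (Int × Int)) : Int × List Int :=
  walkB edge_list (edge_list.length + 5) first_neighbor start_vertex [start_vertex, first_neighbor]

-- ===== PRECONDITION & SPEC =====
def Spec_trace_path_to_end (start_vertex : Int) (first_neighbor : Int) (edge_list : List (Int × Int)) (out : Int × List Int) : Prop := out = trace_path_to_end_alt start_vertex first_neighbor edge_list
instance (start_vertex : Int) (first_neighbor : Int) (edge_list : List (Int × Int)) (out : Int × List Int) : Decidable (Spec_trace_path_to_end start_vertex first_neighbor edge_list out) := by unfold Spec_trace_path_to_end; infer_instance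

-- ===== CLAIM (what is proved, stated in full; the proofs are below) =====
def Claim_equal_trace_path_to_end : Prop := ∀ (start_vertex : Int) (first_neighbor : Int) (edge_list : List (Int × Int)), Dom_trace_path_to_end start_vertex first_neighbor edge_list → Spec_trace_path_to_end start_vertex first_neighbor edge_list (trace_path_to_end start_vertex first_neighbor edge_list)

-- ===== LEMMAS AND PROOFS =====

-- neighbors contributed to vertex v by the edge list, in A's adjacency-map order
def nbrs (l : List (Int × Int)) (v : Int) : List Int :=
  l.flatMap (fun e => (if e.1 = v then [e.2] else []) ++ (if e.2 = v then [e.1] else []))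

lemma getD_adjStep (adj : PySem.Dict Int (List Int)) (e : Int × Int) (v : Int) :
    (adjStep adj e).getD v [] = adj.getD v [] ++ (if e.1 = v then [e.2] else []) ++ (if e.2 = v then [e.1] else []) := by
  unfold adjStep
  have one : ∀ (d : PySem.Dict Int (List Int)) (a b : Int),
      (if d.contains a then d.modify a [] (fun l => l ++ [b]) else d.insert a [b]).getD v []
        = d.getD v [] ++ (if a = v then [b] else []) := by
    intro d a b
    by_cases hc : d.contains a
    · simp only [hc, if_true, PySem.Dict.getD_modify]
      by_cases hv : v = a <;> simp [hv, eq_comm]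
    · have hc' : d.contains a = false := by simpa using hc
      simp only [hc, if_false, PySem.Dict.getD_insert, Bool.false_eq_true]
      by_cases hv : v = a
      · subst hv
        simp [PySem.Dict.getD_of_not_contains d [] hc']
      · simp [hv, Ne.symm hv]
  rw [one, one, List.append_assoc]

lemma getD_build (l : List (Int × Int)) (d : PySem.Dict Int (List Int)) (v : Int) :
    (l.foldl adjStep d).getD v [] = d.getD v [] ++ nbrs l v := by
  induction l generalizing d with
  | nil => simp [nbrs]
  | cons e t ih =>
    simp only [List.foldl_cons, ih, getD_adjStep, nbrs, List.flatMap_cons, List.append_assoc]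

lemma filter_nbrs (l : List (Int × Int)) (current previous : Int) :
    (nbrs l current).filter (fun n => n != previous) = candsB l current previous := by
  induction l with
  | nil => simp [nbrs, candsB]
  | cons e t ih =>
    simp only [nbrs, candsB, List.flatMap_cons, List.filter_append] at *
    rw [ih]
    congr 1
    by_cases h1 : e.1 = current <;> by_cases h2 : e.2 = current <;>
      by_cases h3 : e.2 = previous <;> by_cases h4 : e.1 = previous <;>
        simp_all [List.filter, bne]

lemma walk_eq (edge_list : List (Int × Int)) (fuel : Nat) (current previous : Int) (path : List Int) :
    walkA (get_adjacent_vertices edge_list) fuel current previous path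
      = walkB edge_list fuel current previous path := by
  induction fuel generalizing current previous path with
  | zero => rfl
  | succ n ih =>
    show (match ((get_adjacent_vertices edge_list).getD current []).filter (fun n => n != previous) with
      | [] => (current, path)
      | [c] => walkA (get_adjacent_vertices edge_list) n c current (path ++ [c])
      | _ => (current, path)) = _
    have hc : ((get_adjacent_vertices edge_list).getD current []).filter (fun n => n != previous)
        = candsB edge_list current previous := by
      rw [get_adjacent_vertices, getD_build, PySem.Dict.getD_empty, List.nil_append, filter_nbrs]
    rw [hc]
    show _ = (match n+1, current, previous, path with
      | 0, current, _, path => (current, path)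
      | fuel+1, current, previous, path =>
        let next_candidates := candsB edge_list current previous
        if next_candidates.length == 1 then
          walkB edge_list fuel (next_candidates.headD 0) current (path ++ [next_candidates.headD 0])
        else (current, path))
    cases h : candsB edge_list current previous with
    | nil => simp [h]
    | cons c t =>
      cases t with
      | nil => simpa [h] using ih c current (path ++ [c])
      | cons d u => simp [h]

-- ===== VERDICT (by name: the statement is the Claim_ definition above) =====
theorem trace_path_to_end_spec : Claim_equal_trace_path_to_end := by
  intro s f el _
  show trace_path_to_end s f el = trace_path_to_end_alt s f el
  unfold trace_path_to_end trace_path_to_end_alt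
  exact walk_eq el (el.length + 5) f s [s, f]
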